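-- pv_equiv track=rewrite | github.com/evindor/MicroAdder | src/data.py | decode_answer
-- ===== SOURCE A (Python) =====
-- from typing import List, Tuple
--
-- def get_token_ids(vocab_size: int = 14) -> dict:
--     """Return token ID mapping for a given vocabulary size."""
--     if vocab_size == 14:
--         return {"PLUS": 10, "EQUALS": 11, "EOS": 12, "PAD": 13}
--     elif vocab_size == 12:
--         return {"PLUS": 0, "EQUALS": 0, "EOS": 10, "PAD": 11}
--     elif vocab_size == 10:
--         return {"PLUS": 0, "EQUALS": 0, "EOS": 0, "PAD": 0}
--     else:
--         raise ValueError(f"Unsupported vocab_size: {vocab_size}")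
--
-- ANSWER_LEN = 11
--
-- def decode_answer(tokens: List[int], vocab_size: int = 14) -> int:
--     """Decode LSB-first digit tokens back to integer.
--
--     For vocab=14/12: stops at first token >= 10 (EOS/special).
--     For vocab=10: reads exactly ANSWER_LEN digits (no EOS marker to stop at).
--     """
--     result = 0
--     eos_id = get_token_ids(vocab_size)["EOS"]
--     for i, tok in enumerate(tokens):
--         if i >= ANSWER_LEN:
--             break
--         if vocab_size >= 12 and tok >= 10:
--             break
--         result += tok * (10 ** i)
--     return result
-- ===== SOURCE B (Python) =====
-- from typing import List
--
-- def get_token_ids(vocab_size: int = 14) -> dict: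
--     if vocab_size == 14:
--         return {"PLUS": 10, "EQUALS": 11, "EOS": 12, "PAD": 13}
--     elif vocab_size == 12:
--         return {"PLUS": 0, "EQUALS": 0, "EOS": 10, "PAD": 11}
--     elif vocab_size == 10:
--         return {"PLUS": 0, "EQUALS": 0, "EOS": 0, "PAD": 0}
--     else:
--         raise ValueError(f"Unsupported vocab_size: {vocab_size}")
--
-- ANSWER_LEN = 11
--
-- def decode_answer(tokens: List[int], vocab_size: int = 14) -> int:
--     """Decode LSB-first digit tokens back to integer (build digits, then Horner fold)."""
--     get_token_ids(vocab_size)  # preserve ValueError for unsupported sizes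
--     digits = []
--     for tok in tokens[:ANSWER_LEN]:
--         if vocab_size >= 12 and tok >= 10:
--             break
--         digits.append(tok)
--     acc = 0
--     for d in reversed(digits):
--         acc = acc * 10 + d
--     return acc
-- ===== Notes on version B (the rewrite author's own statement) =====
-- stated objective: idiomatic
-- what changed: B first collects the accepted digit tokens (slice to ANSWER_LEN, stop at a special token), then folds them in reverse with Horner's rule (acc*10+d) instead of summing tok*10**i with an explicit power per position.
import Mathlib
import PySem

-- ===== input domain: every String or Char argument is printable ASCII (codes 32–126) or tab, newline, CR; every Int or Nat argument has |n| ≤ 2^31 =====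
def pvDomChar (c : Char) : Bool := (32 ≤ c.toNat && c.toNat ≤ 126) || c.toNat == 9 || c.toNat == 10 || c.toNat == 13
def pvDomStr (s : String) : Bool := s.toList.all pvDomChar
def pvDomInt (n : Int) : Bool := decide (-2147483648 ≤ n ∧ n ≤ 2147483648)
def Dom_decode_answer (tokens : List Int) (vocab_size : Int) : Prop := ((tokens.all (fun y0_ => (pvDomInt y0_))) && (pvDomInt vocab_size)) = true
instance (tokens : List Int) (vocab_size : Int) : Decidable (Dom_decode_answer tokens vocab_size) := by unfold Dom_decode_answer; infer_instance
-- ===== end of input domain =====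

-- B collects the accepted digits (first ANSWER_LEN tokens, stopping at a special token)
-- and then folds them in reverse with Horner's rule, instead of A's running sum of tok*10^i.


-- ===== PORT A =====
-- A's loop: enumerate tokens, break at i >= ANSWER_LEN (=11) or vocab_size >= 12 ∧ tok >= 10,
-- else result += tok * 10^i.  (The get_token_ids lookup only raises on unsupported vocab_size;
-- those inputs are excluded by Pre_decode_answer.)
def decodeLoopA (vocab_size : Int) : List Int → Nat → Int → Int
  | [], _, result => result
  | tok :: ts, i, result =>
    if i ≥ 11 then result
    else if vocab_size ≥ 12 ∧ tok ≥ 10 then result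
    else decodeLoopA vocab_size ts (i + 1) (result + tok * (10 : Int) ^ i)

def decode_answer (tokens : List Int) (vocab_size : Int) : Int :=
  decodeLoopA vocab_size tokens 0 0

-- ===== PORT B =====
-- collect the accepted digits from tokens[:11]
def collectDigits (vocab_size : Int) : List Int → List Int
  | [] => []
  | tok :: ts =>
    if vocab_size ≥ 12 ∧ tok ≥ 10 then []
    else tok :: collectDigits vocab_size ts

def decode_answer_alt (tokens : List Int) (vocab_size : Int) : Int :=
  (collectDigits vocab_size (PySem.List.slice tokens none (some 11))).reverse.foldl
    (fun acc d => acc * 10 + d) 0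

-- ===== PRECONDITION & SPEC =====
-- Pre_ excludes exactly the vocab sizes on which get_token_ids (hence A) raises ValueError.
def Pre_decode_answer (tokens : List Int) (vocab_size : Int) : Prop :=
  vocab_size = 10 ∨ vocab_size = 12 ∨ vocab_size = 14
instance (tokens : List Int) (vocab_size : Int) : Decidable (Pre_decode_answer tokens vocab_size) := by unfold Pre_decode_answer; infer_instance
def pvWitness_decode_answer : List Int × Int := ([3, 2, 1], 14)

def Spec_decode_answer (tokens : List Int) (vocab_size : Int) (out : Int) : Prop := out = decode_answer_alt tokens vocab_size
instance (tokens : List Int) (vocab_size : Int) (out : Int) : Decidable (Spec_decode_answer tokens vocab_size out) := by unfold Spec_decode_answer; infer_instance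

-- ===== CLAIM (what is proved, stated in full; the proofs are below) =====
def Claim_equal_decode_answer : Prop := ∀ (tokens : List Int) (vocab_size : Int), Dom_decode_answer tokens vocab_size → Pre_decode_answer tokens vocab_size → Spec_decode_answer tokens vocab_size (decode_answer tokens vocab_size)

-- ===== LEMMAS AND PROOFS =====
def hornerVal (ds : List Int) : Int := ds.reverse.foldl (fun acc d => acc * 10 + d) 0

theorem hornerVal_cons (t : Int) (ds : List Int) :
    hornerVal (t :: ds) = t + 10 * hornerVal ds := by
  unfold hornerVal
  rw [List.reverse_cons, List.foldl_append]
  simp [add_comm, mul_comm]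

theorem decodeLoopA_eq (vocab_size : Int) (ts : List Int) :
    ∀ (i : Nat) (r : Int),
      decodeLoopA vocab_size ts i r =
        r + (10 : Int) ^ i * hornerVal (collectDigits vocab_size (ts.take (11 - i))) := by
  induction ts with
  | nil => intro i r; simp [decodeLoopA, collectDigits, hornerVal]
  | cons t ts ih =>
    intro i r
    by_cases h11 : i ≥ 11
    · have : 11 - i = 0 := by omega
      simp [decodeLoopA, h11, this, collectDigits, hornerVal]
    · have hk : 11 - i = (11 - (i + 1)) + 1 := by omega
      by_cases hb : vocab_size ≥ 12 ∧ t ≥ 10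
      · simp [decodeLoopA, h11, hb, hk, List.take_succ_cons, collectDigits, hornerVal]
      · rw [show decodeLoopA vocab_size (t :: ts) i r
              = decodeLoopA vocab_size ts (i + 1) (r + t * (10 : Int) ^ i) by
            simp [decodeLoopA, h11, hb]]
        rw [ih (i + 1) (r + t * (10 : Int) ^ i), hk, List.take_succ_cons]
        rw [show collectDigits vocab_size (t :: ts.take (11 - (i + 1)))
              = t :: collectDigits vocab_size (ts.take (11 - (i + 1))) by
            simp [collectDigits, hb]]
        rw [hornerVal_cons]
        ring

theorem slice_take (tokens : List Int) :
    PySem.List.slice tokens none (some 11) = tokens.take 11 := by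
  simp [pysem]

-- ===== VERDICT (by name: the statement is the Claim_ definition above) =====
theorem decode_answer_spec : Claim_equal_decode_answer := by
  intro tokens vocab_size _ _
  unfold Spec_decode_answer decode_answer decode_answer_alt
  rw [decodeLoopA_eq, slice_take]
  simp [hornerVal]
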